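-- pv_equiv track=rewrite | github.com/zzunic2123/advent-of-code-2025 | day04/solution.py | part2
-- ===== SOURCE A (Python) =====
-- def part2(lines):
--     def valid(row,col):
--         return 0 <= row < m and 0 <= col < n and lines[row][col] == "@"
--     m = len(lines)
--     n = len(lines[0])
--     directions = [(0,1), (0,-1), (1,0), (-1,0), (1,1), (-1,-1), (1,-1),(-1,1)]
--
--     for i in range(m):
--         lines[i] = list(lines[i])
--
--
--     res = 0
--     ans = 0
--     while ans != -1:
--         ans = 0
--
--         for i in range(m):
--             for j in range(n):
--                 if lines[i][j] != "@":
--                     continue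
--                 cnt = 0
--                 for dx,dy in directions:
--                     n_x , n_y = i + dx, j + dy
--                     if valid(n_x, n_y):
--                         cnt+=1
--                 if cnt < 4:
--                     lines[i][j] = "."
--                     ans+=1
--
--         res += ans
--         if ans == 0:
--             ans = -1
--     return res
-- ===== SOURCE B (Python) =====
-- # B: pure set-based simultaneous peeling (removes each round's snapshot of under-4 cells at once,
-- # counts survivors); NOTE: unlike A, B does not mutate `lines` in place (equivalence is about the return value).
-- def part2(lines):
--     m = len(lines)
--     n = len(lines[0])
--     dirs = [(0, 1), (0, -1), (1, 0), (-1, 0), (1, 1), (-1, -1), (1, -1), (-1, 1)]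
--     live = {(i, j) for i in range(m) for j in range(n) if lines[i][j] == "@"}
--     total = len(live)
--     while True:
--         doomed = {c for c in live
--                   if sum(((c[0] + dx, c[1] + dy) in live) for dx, dy in dirs) < 4}
--         if not doomed:
--             break
--         live -= doomed
--     return total - len(live)
-- ===== Notes on version B (the rewrite author's own statement) =====
-- stated objective: alternative
-- what changed: A peels the grid by repeated full sequential in-place sweeps (a removed cell immediately affects later cells of the same sweep) counting removals; B keeps a set of live coordinates, removes each round's snapshot of all under-4-neighbour cells simultaneously, and returns initial minus surviving count — the two processes reach the same fixed point (the 4-core), proved via a confluence argument.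
import Mathlib
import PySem

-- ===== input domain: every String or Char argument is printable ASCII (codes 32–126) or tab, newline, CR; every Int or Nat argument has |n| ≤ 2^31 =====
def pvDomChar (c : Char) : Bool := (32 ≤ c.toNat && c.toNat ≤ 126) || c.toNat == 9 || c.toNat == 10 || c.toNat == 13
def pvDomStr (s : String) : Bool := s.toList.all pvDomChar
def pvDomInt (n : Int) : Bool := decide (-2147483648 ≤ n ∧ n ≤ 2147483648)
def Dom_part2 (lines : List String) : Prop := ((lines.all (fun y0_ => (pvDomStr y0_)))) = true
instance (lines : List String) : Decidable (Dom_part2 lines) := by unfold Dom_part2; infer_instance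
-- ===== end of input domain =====

-- B differs from A in structure only: A peels '@' cells sequentially, sweeping the whole grid in place
-- until a sweep removes nothing and counting removals; B peels in pure simultaneous rounds over a set of
-- live coordinates and counts survivors.  (A mutates `lines` in place, B does not; the claim is about the
-- return value only.)

-- ===== PORT A =====
-- the 8 neighbour directions (the same literal appears in A and in B)
def pvDirs : List (Int × Int) := [(0,1), (0,-1), (1,0), (-1,0), (1,1), (-1,-1), (1,-1), (-1,1)]

-- lines[row][col] on the mutable grid (total form; every access A makes is in range under Pre_)
def pvGet (g : List (List Char)) (r c : Int) : Char :=
  PySem.List.pyGetD (PySem.List.pyGetD g r []) c ' '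

-- A's closure `valid(row, col)` (reads the CURRENT grid, as the Python closure does)
def pvValid (g : List (List Char)) (m n : Nat) (r c : Int) : Bool :=
  decide (0 ≤ r) && decide (r < (m : Int)) && decide (0 ≤ c) && decide (c < (n : Int)) &&
    (pvGet g r c == '@')

-- the body of A's inner double loop for one cell (i, j): `continue` / count / remove in place
def pvCellStep (m n : Nat) (st : List (List Char) × Int) (i j : Nat) : List (List Char) × Int :=
  if pvGet st.1 (i : Int) (j : Int) ≠ '@' then st
  else
    let cnt : Int := pvDirs.foldl
      (fun c d => if pvValid st.1 m n ((i : Int) + d.1) ((j : Int) + d.2) then c + 1 else c) 0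
    if cnt < 4 then
      (PySem.List.pySetD st.1 (i : Int)
         (PySem.List.pySetD (PySem.List.pyGetD st.1 (i : Int) []) (j : Int) '.'),
       st.2 + 1)
    else st

-- one full sweep `for i in range(m): for j in range(n): …` starting from ans = 0
def pvSweep (m n : Nat) (g : List (List Char)) : List (List Char) × Int :=
  (List.range m).foldl
    (fun st i => (List.range n).foldl (fun st j => pvCellStep m n st i j) st) (g, 0)

-- A's outer `while ans != -1` loop; fuel m*n+1 always suffices (each non-final sweep removes a cell)
def pvLoopA (m n : Nat) : Nat → List (List Char) → Int → Int
  | 0, _, res => res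
  | fuel + 1, g, res =>
      let p := pvSweep m n g
      if p.2 = 0 then res + p.2 else pvLoopA m n fuel p.1 (res + p.2)

def part2 (lines : List String) : Int :=
  let m := lines.length
  let n := (PySem.Str.len (PySem.List.pyGetD lines 0 "")).toNat
  pvLoopA m n (m * n + 1) (lines.map String.toList) 0

-- ===== PORT B =====
-- lines[i][j] read directly from the (unchanged) input strings
def pvCharAt (lines : List String) (i j : Nat) : Char :=
  PySem.List.pyGetD (PySem.List.pyGetD lines (i : Int) "").toList (j : Int) ' '

-- sum(((c[0]+dx, c[1]+dy) in live) for dx, dy in dirs)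
def pvDegB (live : PySem.Set (Int × Int)) (c : Int × Int) : Int :=
  (pvDirs.map (fun d => if PySem.Set.contains live (c.1 + d.1, c.2 + d.2) then (1 : Int) else 0)).sum

-- B's `while True` loop; fuel live.length+1 always suffices (each non-break round shrinks live)
def pvLoopB : Nat → PySem.Set (Int × Int) → PySem.Set (Int × Int)
  | 0, live => live
  | fuel + 1, live =>
      let doomed : PySem.Set (Int × Int) :=
        PySem.Set.ofList (live.filter (fun c => decide (pvDegB live c < 4)))
      if doomed.isEmpty then live else pvLoopB fuel (PySem.Set.diff live doomed)

def part2_alt (lines : List String) : Int :=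
  let m := lines.length
  let n := (PySem.Str.len (PySem.List.pyGetD lines 0 "")).toNat
  let live : PySem.Set (Int × Int) :=
    PySem.Set.ofList ((List.range m).flatMap (fun i =>
      ((List.range n).filter (fun j => pvCharAt lines i j == '@')).map
        (fun j : Nat => ((i : Int), (j : Int)))))
  let total := PySem.Set.len live
  total - PySem.Set.len (pvLoopB (live.length + 1) live)

-- ===== PRECONDITION & SPEC =====
-- Pre_ excludes exactly the inputs on which A raises IndexError: the empty list (lines[0]) and
-- grids with a row shorter than the first row (lines[row][col] for col < len(lines[0])).
def Pre_part2 (lines : List String) : Prop :=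
  lines ≠ [] ∧ ∀ l ∈ lines, PySem.Str.len (PySem.List.pyGetD lines 0 "") ≤ PySem.Str.len l
instance (lines : List String) : Decidable (Pre_part2 lines) := by unfold Pre_part2; infer_instance

def pvWitness_part2 : List String := ["@@.", ".@@", "@@@"]

def Spec_part2 (lines : List String) (out : Int) : Prop := out = part2_alt lines
instance (lines : List String) (out : Int) : Decidable (Spec_part2 lines out) := by
  unfold Spec_part2; infer_instance

-- ===== CLAIM (what is proved, stated in full; the proofs are below) =====
def Claim_equal_part2 : Prop :=
  ∀ (lines : List String), Dom_part2 lines → Pre_part2 lines → Spec_part2 lines (part2 lines)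

-- ===== LEMMAS AND PROOFS =====

-- ---------- abstract layer: peeling a set of cells, its confluence ----------
def pvDeg (S : Finset (Int × Int)) (c : Int × Int) : ℕ :=
  pvDirs.countP (fun d => decide ((c.1 + d.1, c.2 + d.2) ∈ S))

def pvClosed (S : Finset (Int × Int)) : Prop := ∀ c ∈ S, 4 ≤ pvDeg S c

def pvStep (S T : Finset (Int × Int)) : Prop := ∃ c ∈ S, pvDeg S c < 4 ∧ T = S.erase c

def pvReach : Finset (Int × Int) → Finset (Int × Int) → Prop := Relation.ReflTransGen pvStep

def pvCore (S : Finset (Int × Int)) : Finset (Int × Int) :=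
  (S.powerset.filter (fun K => ∀ c ∈ K, 4 ≤ pvDeg K c)).sup id

lemma pvDeg_mono {S T : Finset (Int × Int)} (h : S ⊆ T) (c : Int × Int) :
    pvDeg S c ≤ pvDeg T c := by
  apply List.countP_mono_left
  intro d _ hd
  simp only [decide_eq_true_eq] at hd ⊢
  exact h hd

lemma pvMem_core {S : Finset (Int × Int)} {x : Int × Int} :
    x ∈ pvCore S ↔ ∃ K, K ⊆ S ∧ pvClosed K ∧ x ∈ K := by
  simp [pvCore, Finset.mem_sup, Finset.mem_filter, Finset.mem_powerset, pvClosed]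
  tauto

lemma pvCore_subset (S : Finset (Int × Int)) : pvCore S ⊆ S := by
  intro x hx
  obtain ⟨K, hKS, _, hxK⟩ := pvMem_core.1 hx
  exact hKS hxK

lemma pvClosed_core (S : Finset (Int × Int)) : pvClosed (pvCore S) := by
  intro c hc
  obtain ⟨K, hKS, hKcl, hcK⟩ := pvMem_core.1 hc
  have hKsub : K ⊆ pvCore S := fun y hy => pvMem_core.2 ⟨K, hKS, hKcl, hy⟩
  exact le_trans (hKcl c hcK) (pvDeg_mono hKsub c)

lemma pvSubset_core {K S : Finset (Int × Int)} (hKS : K ⊆ S) (hK : pvClosed K) :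
    K ⊆ pvCore S := fun _ hy => pvMem_core.2 ⟨K, hKS, hK, hy⟩

lemma pvCore_step {S T : Finset (Int × Int)} (h : pvStep S T) : pvCore T = pvCore S := by
  obtain ⟨c, hcS, hdeg, rfl⟩ := h
  apply Finset.Subset.antisymm
  · intro x hx
    obtain ⟨K, hKS, hKcl, hxK⟩ := pvMem_core.1 hx
    exact pvMem_core.2 ⟨K, hKS.trans (Finset.erase_subset _ _), hKcl, hxK⟩
  · have hnotc : c ∉ pvCore S := by
      intro hc
      exact absurd (le_trans (pvClosed_core S c hc) (pvDeg_mono (pvCore_subset S) c))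
        (by omega)
    apply pvSubset_core _ (pvClosed_core S)
    intro y hy
    exact Finset.mem_erase.2 ⟨fun hyc => hnotc (hyc ▸ hy), pvCore_subset S hy⟩

lemma pvCore_reach {S T : Finset (Int × Int)} (h : pvReach S T) : pvCore T = pvCore S := by
  induction h with
  | refl => rfl
  | tail _ hstep ih => rw [pvCore_step hstep, ih]

lemma pvCore_of_closed {T : Finset (Int × Int)} (h : pvClosed T) : pvCore T = T :=
  Finset.Subset.antisymm (pvCore_subset T) (pvSubset_core (le_refl T) h)

lemma pvReach_subset {S T : Finset (Int × Int)} (h : pvReach S T) : T ⊆ S := by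
  induction h with
  | refl => exact Finset.Subset.refl _
  | tail _ hstep ih =>
    obtain ⟨c, _, _, rfl⟩ := hstep
    exact (Finset.erase_subset _ _).trans ih

-- removing simultaneously a set of under-4 cells is reachable by single removals
lemma pvReach_sdiff (D S : Finset (Int × Int)) (hDS : D ⊆ S)
    (hdeg : ∀ c ∈ D, pvDeg S c < 4) : pvReach S (S \ D) := by
  induction hn : D.card generalizing D S with
  | zero =>
    have : D = ∅ := Finset.card_eq_zero.1 hn
    subst this
    simp only [Finset.sdiff_empty]
    exact Relation.ReflTransGen.refl
  | succ k ih =>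
    obtain ⟨c, hcD⟩ := Finset.card_pos.1 (by rw [hn]; exact Nat.succ_pos k)
    have hstep : pvStep S (S.erase c) := ⟨c, hDS hcD, hdeg c hcD, rfl⟩
    have hsub : D.erase c ⊆ S.erase c := by
      intro x hx
      rw [Finset.mem_erase] at hx ⊢
      exact ⟨hx.1, hDS hx.2⟩
    have hdeg' : ∀ x ∈ D.erase c, pvDeg (S.erase c) x < 4 := fun x hx =>
      lt_of_le_of_lt (pvDeg_mono (Finset.erase_subset _ _) x)
        (hdeg x (Finset.mem_of_mem_erase hx))
    have hcard : (D.erase c).card = k := by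
      rw [Finset.card_erase_of_mem hcD, hn]; omega
    have hrest := ih (D.erase c) (S.erase c) hsub hdeg' hcard
    have hEq : S.erase c \ D.erase c = S \ D := by
      ext x
      simp only [Finset.mem_sdiff, Finset.mem_erase]
      constructor
      · rintro ⟨⟨hxc, hxS⟩, hnx⟩
        exact ⟨hxS, fun hxD => hnx ⟨hxc, hxD⟩⟩
      · rintro ⟨hxS, hxD⟩
        have hxc : x ≠ c := fun h => hxD (by rw [h]; exact hcD)
        exact ⟨⟨hxc, hxS⟩, fun h => hxD h.2⟩
    exact Relation.ReflTransGen.head hstep (hEq ▸ hrest)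

-- ---------- bridge for port A ----------
def pvRowsOK (g : List (List Char)) (n : Nat) : Prop := ∀ row ∈ g, n ≤ row.length

def pvLive (g : List (List Char)) (n : Nat) : Finset (Int × Int) :=
  (((Finset.range g.length) ×ˢ (Finset.range n)).filter
    (fun p => pvGet g (p.1 : Int) (p.2 : Int) = '@')).image
    (fun p => ((p.1 : Int), (p.2 : Int)))

lemma pvMem_live {g : List (List Char)} {n : Nat} {x : Int × Int} :
    x ∈ pvLive g n ↔ 0 ≤ x.1 ∧ x.1 < (g.length : Int) ∧ 0 ≤ x.2 ∧ x.2 < (n : Int) ∧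
      pvGet g x.1 x.2 = '@' := by
  unfold pvLive
  simp only [Finset.mem_image, Finset.mem_filter, Finset.mem_product, Finset.mem_range]
  constructor
  · rintro ⟨⟨i, j⟩, ⟨⟨hi, hj⟩, hat⟩, rfl⟩
    exact ⟨by simp, by simp; omega, by simp, by simp; omega, by simpa using hat⟩
  · rintro ⟨h1, h2, h3, h4, h5⟩
    refine ⟨(x.1.toNat, x.2.toNat), ⟨⟨by omega, by omega⟩, ?_⟩, ?_⟩
    · simpa only [Int.toNat_of_nonneg h1, Int.toNat_of_nonneg h3] using h5
    · ext <;> simp [Int.toNat_of_nonneg h1, Int.toNat_of_nonneg h3]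

lemma pvValid_iff (g : List (List Char)) (n : Nat) (r c : Int) :
    pvValid g g.length n r c = true ↔ (r, c) ∈ pvLive g n := by
  rw [pvMem_live]
  simp [pvValid, and_assoc]

lemma pvCnt_eq_deg (g : List (List Char)) (n : Nat) (i j : Int) :
    pvDirs.foldl (fun c d => if pvValid g g.length n (i + d.1) (j + d.2) then c + 1 else c)
      (0 : Int) = (pvDeg (pvLive g n) (i, j) : Int) := by
  rw [PySem.List.foldl_count_if (fun d => pvValid g g.length n (i + d.1) (j + d.2)) pvDirs 0,
    zero_add]
  congr 1
  apply List.countP_congr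
  intro d _
  rw [pvValid_iff]
  simp

lemma pvGet_setCell {g : List (List Char)} {i j : Nat} (hi : i < g.length)
    (hj : j < (PySem.List.pyGetD g (i : Int) []).length) (a b : Nat) :
    pvGet (PySem.List.pySetD g (i : Int)
      (PySem.List.pySetD (PySem.List.pyGetD g (i : Int) []) (j : Int) '.')) (a : Int) (b : Int) =
    if a = i ∧ b = j then '.' else pvGet g (a : Int) (b : Int) := by
  unfold pvGet
  rw [PySem.List.pyGetD_pySetD_natCast _ i a _ _ hi]
  by_cases hai : a = i
  · subst hai
    rw [if_pos rfl, PySem.List.pyGetD_pySetD_natCast _ j b _ _ hj]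
    by_cases hbj : b = j
    · simp [hbj]
    · simp [hbj]
  · simp [hai]

lemma pvGet_int_eq {g : List (List Char)} {x : Int × Int} (h1 : 0 ≤ x.1) (h2 : 0 ≤ x.2) :
    pvGet g x.1 x.2 = pvGet g (x.1.toNat : Int) (x.2.toNat : Int) := by
  rw [Int.toNat_of_nonneg h1, Int.toNat_of_nonneg h2]

lemma pvLive_set {g : List (List Char)} {n i j : Nat} (hi : i < g.length)
    (hj : j < (PySem.List.pyGetD g (i : Int) []).length) :
    pvLive (PySem.List.pySetD g (i : Int)
      (PySem.List.pySetD (PySem.List.pyGetD g (i : Int) []) (j : Int) '.')) n =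
    (pvLive g n).erase ((i : Int), (j : Int)) := by
  have hlen : (PySem.List.pySetD g (i : Int)
      (PySem.List.pySetD (PySem.List.pyGetD g (i : Int) []) (j : Int) '.')).length = g.length := by
    rw [PySem.List.pySetD_natCast]
    exact List.length_set ..
  ext x
  rw [Finset.mem_erase, pvMem_live, pvMem_live, hlen]
  constructor
  · rintro ⟨ha, hb, hc, hd, he⟩
    rw [pvGet_int_eq ha hc, pvGet_setCell hi hj] at he
    split at he
    · exact absurd he (by decide)
    · rename_i hne
      refine ⟨?_, ha, hb, hc, hd, by rwa [pvGet_int_eq ha hc]⟩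
      intro hx
      apply hne
      constructor
      · have := congrArg Prod.fst hx; simp at this; omega
      · have := congrArg Prod.snd hx; simp at this; omega
  · rintro ⟨hne, ha, hb, hc, hd, he⟩
    refine ⟨ha, hb, hc, hd, ?_⟩
    rw [pvGet_int_eq ha hc, pvGet_setCell hi hj]
    have : ¬(x.1.toNat = i ∧ x.2.toNat = j) := by
      rintro ⟨rfl, rfl⟩
      apply hne
      ext <;> simp <;> omega
    rw [if_neg this, ← pvGet_int_eq ha hc]
    exact he

lemma pvRowsOK_set {g : List (List Char)} {n i j : Nat} (hi : i < g.length)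
    (hrows : pvRowsOK g n) :
    pvRowsOK (PySem.List.pySetD g (i : Int)
      (PySem.List.pySetD (PySem.List.pyGetD g (i : Int) []) (j : Int) '.')) n := by
  intro row hrow
  rw [PySem.List.pySetD_natCast] at hrow
  rcases List.mem_or_eq_of_mem_set hrow with h | h
  · exact hrows row h
  · subst h
    rw [PySem.List.pySetD_natCast, List.length_set, PySem.List.pyGetD_ofNat _ _ _ hi]
    exact hrows _ (List.getElem_mem hi)

lemma pvRow_len {g : List (List Char)} {n i j : Nat} (hi : i < g.length) (hj : j < n)
    (hrows : pvRowsOK g n) : j < (PySem.List.pyGetD g (i : Int) []).length := by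
  rw [PySem.List.pyGetD_ofNat _ _ _ hi]
  exact lt_of_lt_of_le hj (hrows _ (List.getElem_mem hi))

lemma pvCellStep_spec (n : Nat) (g : List (List Char)) (ans : Int) (i j : Nat)
    (hrows : pvRowsOK g n) (hi : i < g.length) (hj : j < n) :
    (pvCellStep g.length n (g, ans) i j).1.length = g.length ∧
    pvRowsOK (pvCellStep g.length n (g, ans) i j).1 n ∧
    pvReach (pvLive g n) (pvLive (pvCellStep g.length n (g, ans) i j).1 n) ∧
    (pvCellStep g.length n (g, ans) i j).2 + ((pvLive (pvCellStep g.length n (g, ans) i j).1 n).card : Int)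
      = ans + ((pvLive g n).card : Int) ∧
    ((pvCellStep g.length n (g, ans) i j).2 = ans →
      (pvCellStep g.length n (g, ans) i j).1 = g ∧
      (((i : Int), (j : Int)) ∈ pvLive g n → 4 ≤ pvDeg (pvLive g n) ((i : Int), (j : Int)))) := by
  by_cases hat : pvGet g (i : Int) (j : Int) ≠ '@'
  · have hred : pvCellStep g.length n (g, ans) i j = (g, ans) := by
      simp only [pvCellStep]
      rw [if_pos hat]
    rw [hred]
    refine ⟨rfl, hrows, Relation.ReflTransGen.refl, rfl, fun _ => ⟨rfl, fun hmem => ?_⟩⟩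
    exact absurd (pvMem_live.1 hmem).2.2.2.2 hat
  · rw [not_not] at hat
    have hcnt := pvCnt_eq_deg g n (i : Int) (j : Int)
    by_cases hlt : ((pvDeg (pvLive g n) ((i : Int), (j : Int)) : Int)) < 4
    · have hmem : (((i : Int), (j : Int))) ∈ pvLive g n :=
        pvMem_live.2 ⟨by simp, by simp; omega, by simp, by simp; omega, by simpa using hat⟩
      have hjrow := pvRow_len hi hj hrows
      have hred : pvCellStep g.length n (g, ans) i j =
          (PySem.List.pySetD g (i : Int)
            (PySem.List.pySetD (PySem.List.pyGetD g (i : Int) []) (j : Int) '.'), ans + 1) := by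
        simp only [pvCellStep, hat]
        rw [hcnt, if_neg (by simp), if_pos hlt]
      rw [hred]
      have hlen : (PySem.List.pySetD g (i : Int)
          (PySem.List.pySetD (PySem.List.pyGetD g (i : Int) []) (j : Int) '.')).length
          = g.length := by
        rw [PySem.List.pySetD_natCast]; exact List.length_set ..
      have hlive := pvLive_set (n := n) hi hjrow
      have hpos : 0 < (pvLive g n).card := Finset.card_pos.2 ⟨_, hmem⟩
      refine ⟨hlen, pvRowsOK_set hi hrows, ?_, ?_, ?_⟩
      · rw [hlive]
        exact Relation.ReflTransGen.single ⟨_, hmem, by exact_mod_cast hlt, rfl⟩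
      · rw [hlive, Finset.card_erase_of_mem hmem]
        push_cast [Nat.cast_sub (by omega : 1 ≤ (pvLive g n).card)]
        ring
      · intro habs
        exfalso
        omega
    · have hred : pvCellStep g.length n (g, ans) i j = (g, ans) := by
        simp only [pvCellStep, hat]
        rw [hcnt, if_neg (by simp), if_neg hlt]
      rw [hred]
      exact ⟨rfl, hrows, Relation.ReflTransGen.refl, rfl,
        fun _ => ⟨rfl, fun _ => by exact_mod_cast not_lt.1 hlt⟩⟩

lemma pvFold_spec (n : Nat) :
    ∀ (ps : List (Nat × Nat)) (g : List (List Char)) (ans : Int),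
      pvRowsOK g n → (∀ p ∈ ps, p.1 < g.length ∧ p.2 < n) →
      (ps.foldl (fun st p => pvCellStep g.length n st p.1 p.2) (g, ans)).1.length = g.length ∧
      pvRowsOK (ps.foldl (fun st p => pvCellStep g.length n st p.1 p.2) (g, ans)).1 n ∧
      pvReach (pvLive g n)
        (pvLive (ps.foldl (fun st p => pvCellStep g.length n st p.1 p.2) (g, ans)).1 n) ∧
      (ps.foldl (fun st p => pvCellStep g.length n st p.1 p.2) (g, ans)).2 +
        ((pvLive (ps.foldl (fun st p => pvCellStep g.length n st p.1 p.2) (g, ans)).1 n).card : Int)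
        = ans + ((pvLive g n).card : Int) ∧
      ((ps.foldl (fun st p => pvCellStep g.length n st p.1 p.2) (g, ans)).2 = ans →
        (ps.foldl (fun st p => pvCellStep g.length n st p.1 p.2) (g, ans)).1 = g ∧
        ∀ p ∈ ps, (((p.1 : Int), (p.2 : Int)) ∈ pvLive g n →
          4 ≤ pvDeg (pvLive g n) ((p.1 : Int), (p.2 : Int)))) := by
  intro ps
  induction ps with
  | nil =>
    intro g ans hrows _
    exact ⟨rfl, hrows, Relation.ReflTransGen.refl, rfl, fun _ => ⟨rfl, by simp⟩⟩
  | cons p ps ih =>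
    intro g ans hrows hbnd
    have hp := hbnd p (List.mem_cons_self ..)
    obtain ⟨h1, h2, h3, h4, h5⟩ := pvCellStep_spec n g ans p.1 p.2 hrows hp.1 hp.2
    simp only [List.foldl_cons]
    set st1 := pvCellStep g.length n (g, ans) p.1 p.2 with hst1
    have hst1pair : st1 = (st1.1, st1.2) := rfl
    have ihh := ih st1.1 st1.2 h2
      (fun q hq => by rw [h1]; exact hbnd q (List.mem_cons_of_mem _ hq))
    rw [h1] at ihh
    rw [hst1pair]
    obtain ⟨i1, i2, i3, i4, i5⟩ := ihh
    have hsub1 : (pvLive (ps.foldl (fun st p => pvCellStep g.length n st p.1 p.2)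
        (st1.1, st1.2)).1 n).card ≤ (pvLive st1.1 n).card :=
      Finset.card_le_card (pvReach_subset i3)
    have hsub2 : (pvLive st1.1 n).card ≤ (pvLive g n).card :=
      Finset.card_le_card (pvReach_subset h3)
    refine ⟨i1, i2, Relation.ReflTransGen.trans h3 i3, by omega, ?_⟩
    intro hF
    have hst2 : st1.2 = ans := by omega
    obtain ⟨hg1, hhead⟩ := h5 hst2
    obtain ⟨hF1, hrest⟩ := i5 (hF.trans hst2.symm)
    rw [hg1] at hrest
    refine ⟨hF1.trans hg1, ?_⟩
    intro q hq
    rcases List.mem_cons.1 hq with rfl | hq'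
    · exact hhead
    · exact hrest q hq'

lemma pvSweep_spec (m n : Nat) (g : List (List Char)) (hm : g.length = m)
    (hrows : pvRowsOK g n) :
    (pvSweep m n g).1.length = m ∧ pvRowsOK (pvSweep m n g).1 n ∧
    pvReach (pvLive g n) (pvLive (pvSweep m n g).1 n) ∧
    (pvSweep m n g).2 + ((pvLive (pvSweep m n g).1 n).card : Int) = ((pvLive g n).card : Int) ∧
    ((pvSweep m n g).2 = 0 → (pvSweep m n g).1 = g ∧ pvClosed (pvLive g n)) := by
  subst hm
  have hsweep : pvSweep g.length n g =
      ((List.range g.length).flatMap (fun i => (List.range n).map (fun j => (i, j)))).foldl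
        (fun st p => pvCellStep g.length n st p.1 p.2) (g, 0) := by
    simp [pvSweep, List.foldl_flatMap, List.foldl_map]
  have hbnd : ∀ p ∈ (List.range g.length).flatMap (fun i => (List.range n).map (fun j => (i, j))),
      p.1 < g.length ∧ p.2 < n := by
    intro p hp
    simp only [List.mem_flatMap, List.mem_map, List.mem_range] at hp
    obtain ⟨i, hi, j, hj, rfl⟩ := hp
    exact ⟨hi, hj⟩
  obtain ⟨f1, f2, f3, f4, f5⟩ := pvFold_spec n
    ((List.range g.length).flatMap (fun i => (List.range n).map (fun j => (i, j)))) g 0 hrows hbnd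
  rw [hsweep]
  refine ⟨f1, f2, f3, by omega, ?_⟩
  intro h0
  obtain ⟨hg, hclosed⟩ := f5 h0
  refine ⟨hg, ?_⟩
  intro c hc
  obtain ⟨h1, h2, h3, h4, _⟩ := pvMem_live.1 hc
  have hmemps : ((c.1.toNat, c.2.toNat) : Nat × Nat) ∈
      (List.range g.length).flatMap (fun i => (List.range n).map (fun j => (i, j))) := by
    simp only [List.mem_flatMap, List.mem_map, List.mem_range]
    exact ⟨c.1.toNat, by omega, c.2.toNat, by omega, rfl⟩
  have hceq : (((c.1.toNat : Nat) : Int), ((c.2.toNat : Nat) : Int)) = c := by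
    ext <;> simp <;> omega
  have hcl := hclosed _ hmemps
  rw [hceq] at hcl
  exact hcl hc

lemma pvLoopA_spec (m n : Nat) :
    ∀ (fuel : Nat) (g : List (List Char)) (res : Int), g.length = m → pvRowsOK g n →
      (pvLive g n).card + 1 ≤ fuel →
      pvLoopA m n fuel g res
        = res + ((pvLive g n).card : Int) - ((pvCore (pvLive g n)).card : Int) := by
  intro fuel
  induction fuel with
  | zero => intro g res _ _ hfuel; omega
  | succ fuel ih =>
    intro g res hm hrows hfuel
    obtain ⟨s1, s2, s3, s4, s5⟩ := pvSweep_spec m n g hm hrows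
    simp only [pvLoopA]
    by_cases h0 : (pvSweep m n g).2 = 0
    · rw [if_pos h0]
      obtain ⟨_, hcl⟩ := s5 h0
      rw [pvCore_of_closed hcl, h0]
      ring
    · rw [if_neg h0]
      have hsub : (pvLive (pvSweep m n g).1 n).card ≤ (pvLive g n).card :=
        Finset.card_le_card (pvReach_subset s3)
      rw [ih (pvSweep m n g).1 (res + (pvSweep m n g).2) s1 s2 (by omega)]
      rw [pvCore_reach s3]
      omega

lemma part2_eq (lines : List String) (hpre : Pre_part2 lines) :
    part2 lines
      = ((pvLive (lines.map String.toList)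
          (PySem.Str.len (PySem.List.pyGetD lines 0 "")).toNat).card : Int)
        - ((pvCore (pvLive (lines.map String.toList)
          (PySem.Str.len (PySem.List.pyGetD lines 0 "")).toNat)).card : Int) := by
  obtain ⟨hne, hrows⟩ := hpre
  set n := (PySem.Str.len (PySem.List.pyGetD lines 0 "")).toNat with hn
  set g := lines.map String.toList with hg
  have hm : g.length = lines.length := List.length_map ..
  have hrowsOK : pvRowsOK g n := by
    intro row hrow
    rw [hg, List.mem_map] at hrow
    obtain ⟨str, hs, rfl⟩ := hrow
    have h := hrows str hs
    rw [hn]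
    simp only [PySem.Str.len] at h ⊢
    omega
  have hcard : (pvLive g n).card ≤ lines.length * n := by
    have h1 : (pvLive g n).card
        ≤ (((Finset.range g.length) ×ˢ (Finset.range n)).filter
            (fun p => pvGet g (p.1 : Int) (p.2 : Int) = '@')).card := Finset.card_image_le
    have h2 := Finset.card_filter_le ((Finset.range g.length) ×ˢ (Finset.range n))
      (fun p => pvGet g (p.1 : Int) (p.2 : Int) = '@')
    have h3 : ((Finset.range g.length) ×ˢ (Finset.range n)).card = lines.length * n := by
      rw [Finset.card_product, Finset.card_range, Finset.card_range, hm]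
    calc (pvLive g n).card ≤ _ := h1
      _ ≤ _ := h2
      _ = _ := h3
  have hpart : part2 lines = pvLoopA lines.length n (lines.length * n + 1) g 0 := rfl
  rw [hpart, pvLoopA_spec lines.length n (lines.length * n + 1) g 0 hm hrowsOK (by omega)]
  ring

-- ---------- bridge for port B ----------
lemma pvDegB_eq (live : PySem.Set (Int × Int)) (c : Int × Int) :
    pvDegB live c = (pvDeg live.toFinset c : Int) := by
  unfold pvDegB pvDeg
  rw [PySem.List.sum_map_ite_one_zero (fun d => PySem.Set.contains live (c.1 + d.1, c.2 + d.2))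
    pvDirs]
  congr 1
  apply List.countP_congr
  intro d _
  rw [PySem.Set.contains_iff]
  simp

lemma pvLoopB_spec :
    ∀ (fuel : Nat) (live : PySem.Set (Int × Int)), live.Nodup → live.length + 1 ≤ fuel →
      (pvLoopB fuel live).Nodup ∧
      (pvLoopB fuel live).toFinset = pvCore live.toFinset ∧
      (pvLoopB fuel live).length = (pvCore live.toFinset).card := by
  intro fuel
  induction fuel with
  | zero => intro live _ hfuel; omega
  | succ fuel ih =>
    intro live hnd hfuel
    simp only [pvLoopB]
    by_cases he : (PySem.Set.ofList (live.filter (fun c => decide (pvDegB live c < 4)))).isEmpty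
      = true
    · rw [if_pos he]
      have hfil : live.filter (fun c => decide (pvDegB live c < 4)) = [] := by
        rw [List.eq_nil_iff_forall_not_mem]
        intro x hx
        have hmem := (PySem.Set.mem_ofList (live.filter (fun c => decide (pvDegB live c < 4))) x).2 hx
        rw [List.isEmpty_iff.1 he] at hmem
        exact absurd hmem (List.not_mem_nil)
      have hclosed : pvClosed live.toFinset := by
        intro x hx
        have hxl : x ∈ live := List.mem_toFinset.1 hx
        have hnot : ¬ (pvDegB live x < 4) := by
          intro hlt
          have hmem : x ∈ live.filter (fun c => decide (pvDegB live c < 4)) :=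
            List.mem_filter.2 ⟨hxl, by simpa using hlt⟩
          rw [hfil] at hmem
          exact absurd hmem (List.not_mem_nil)
        have h4 : (4 : Int) ≤ pvDegB live x := not_lt.1 hnot
        rw [pvDegB_eq] at h4
        exact_mod_cast h4
      refine ⟨hnd, (pvCore_of_closed hclosed).symm, ?_⟩
      rw [pvCore_of_closed hclosed, List.toFinset_card_of_nodup hnd]
    · rw [if_neg he]
      have hdsub : ∀ x ∈ PySem.Set.ofList (live.filter (fun c => decide (pvDegB live c < 4))),
          x ∈ live ∧ pvDegB live x < 4 := by
        intro x hx
        have h := (PySem.Set.mem_ofList _ x).1 hx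
        have h' := List.mem_filter.1 h
        exact ⟨h'.1, by simpa using h'.2⟩
      set doomed := PySem.Set.ofList (live.filter (fun c => decide (pvDegB live c < 4)))
        with hdoomed
      set live' := PySem.Set.diff live doomed with hlive'
      have hnd' : live'.Nodup := PySem.Set.nodup_diff _ _ hnd
      have hfinset : live'.toFinset = live.toFinset \ doomed.toFinset := by
        ext x
        rw [List.mem_toFinset, Finset.mem_sdiff, hlive', PySem.Set.mem_diff,
          List.mem_toFinset, List.mem_toFinset]
      have hDsubF : doomed.toFinset ⊆ live.toFinset := fun x hx =>
        List.mem_toFinset.2 (hdsub x (List.mem_toFinset.1 hx)).1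
      have hdegF : ∀ c ∈ doomed.toFinset, pvDeg live.toFinset c < 4 := by
        intro c hc
        have h := (hdsub c (List.mem_toFinset.1 hc)).2
        rw [pvDegB_eq] at h
        exact_mod_cast h
      have hreach : pvReach live.toFinset live'.toFinset := by
        rw [hfinset]
        exact pvReach_sdiff _ _ hDsubF hdegF
      have hne : doomed ≠ [] := by
        intro h
        rw [h] at he
        exact he rfl
      obtain ⟨x, hx⟩ := List.exists_mem_of_ne_nil doomed hne
      have hxlive : x ∈ live.toFinset := List.mem_toFinset.2 (hdsub x hx).1
      have hxnot : x ∉ live'.toFinset := by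
        rw [hfinset, Finset.mem_sdiff]
        intro hcon
        exact hcon.2 (List.mem_toFinset.2 hx)
      have hsub : live'.toFinset ⊆ live.toFinset := by
        rw [hfinset]
        exact Finset.sdiff_subset
      have hss : live'.toFinset ⊂ live.toFinset :=
        (Finset.ssubset_iff_of_subset hsub).2 ⟨x, hxlive, hxnot⟩
      have hlen' : live'.length < live.length := by
        have hc := Finset.card_lt_card hss
        rwa [List.toFinset_card_of_nodup hnd, List.toFinset_card_of_nodup hnd'] at hc
      obtain ⟨j1, j2, j3⟩ := ih live' hnd' (by omega)
      exact ⟨j1, by rw [j2, pvCore_reach hreach], by rw [j3, pvCore_reach hreach]⟩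

lemma pvRow_eq (lines : List String) (i : Nat) :
    (PySem.List.pyGetD lines (i : Int) "").toList
      = PySem.List.pyGetD (lines.map String.toList) (i : Int) [] := by
  rw [PySem.List.pyGetD_natCast, PySem.List.pyGetD_natCast]
  by_cases h : i < lines.length
  · rw [List.getD, List.getD, List.getElem?_eq_getElem h,
      List.getElem?_eq_getElem (by rw [List.length_map]; omega), Option.getD_some,
      Option.getD_some, List.getElem_map]
  · rw [List.getD_eq_default _ _ (by omega),
      List.getD_eq_default _ _ (by rw [List.length_map]; omega)]
    simp

lemma pvCharAt_eq (lines : List String) (i j : Nat) :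
    pvCharAt lines i j = pvGet (lines.map String.toList) (i : Int) (j : Int) := by
  unfold pvCharAt pvGet
  rw [pvRow_eq]

lemma part2_alt_eq (lines : List String) :
    part2_alt lines
      = ((pvLive (lines.map String.toList)
          (PySem.Str.len (PySem.List.pyGetD lines 0 "")).toNat).card : Int)
        - ((pvCore (pvLive (lines.map String.toList)
          (PySem.Str.len (PySem.List.pyGetD lines 0 "")).toNat)).card : Int) := by
  set n := (PySem.Str.len (PySem.List.pyGetD lines 0 "")).toNat with hn
  set live0 : PySem.Set (Int × Int) :=
    PySem.Set.ofList ((List.range lines.length).flatMap (fun i =>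
      ((List.range n).filter (fun j => pvCharAt lines i j == '@')).map
        (fun j : Nat => ((i : Int), (j : Int))))) with hlive0
  have hnd : live0.Nodup := PySem.Set.nodup_ofList _
  have hfin : live0.toFinset = pvLive (lines.map String.toList) n := by
    ext x
    rw [List.mem_toFinset, hlive0, PySem.Set.mem_ofList, pvMem_live]
    constructor
    · intro hx
      obtain ⟨i, hi, hmem⟩ := List.mem_flatMap.1 hx
      obtain ⟨j, hjf, rfl⟩ := List.mem_map.1 hmem
      obtain ⟨hj, hat⟩ := List.mem_filter.1 hjf
      rw [List.mem_range] at hi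
      rw [List.mem_range] at hj
      refine ⟨by simp, by simp [List.length_map]; omega, by simp, by simp; omega, ?_⟩
      rw [beq_iff_eq, pvCharAt_eq] at hat
      simpa using hat
    · rintro ⟨h1, h2, h3, h4, h5⟩
      rw [List.length_map] at h2
      apply List.mem_flatMap.2
      refine ⟨x.1.toNat, List.mem_range.2 (by omega), ?_⟩
      apply List.mem_map.2
      refine ⟨x.2.toNat, List.mem_filter.2 ⟨List.mem_range.2 (by omega), ?_⟩, ?_⟩
      · rw [beq_iff_eq, pvCharAt_eq, Int.toNat_of_nonneg h1, Int.toNat_of_nonneg h3]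
        exact h5
      · ext <;> simp <;> omega
  have hspec := pvLoopB_spec (live0.length + 1) live0 hnd (le_refl _)
  have hpart : part2_alt lines
      = PySem.Set.len live0 - PySem.Set.len (pvLoopB (live0.length + 1) live0) := rfl
  rw [hpart]
  simp only [PySem.Set.len]
  rw [hspec.2.2, hfin, ← hfin, List.toFinset_card_of_nodup hnd, hfin]

-- ===== VERDICT (by name: the statement is the Claim_ definition above) =====
theorem part2_spec : Claim_equal_part2 := by
  intro lines _ hpre
  unfold Spec_part2
  rw [part2_eq lines hpre, part2_alt_eq lines]
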